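-- pv_equiv track=rewrite | github.com/aghaffar101/gomoku | gomoku.py | detect_row2
-- ===== SOURCE A (Python) =====
-- def is_bounded(board, y_end, x_end, length, d_y, d_x):
--     count = 0
--
--
--     if not is_out_of_bounds(board, y_end + d_y, x_end + d_x):
--         if board[y_end + d_y][x_end + d_x] == " ":
--             count = count + 1
--
--
--     if not is_out_of_bounds(board, (y_end-(length*d_y)),(x_end-(length*d_x))):
--         if board[y_end-(length*d_y)][x_end-(length*d_x)] == " ":
--             count = count + 1
--
--
--     if count == 2 :
--         return "OPEN"
--     elif count == 1 :
--         return "SEMIOPEN"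
--     else:
--         return "CLOSED"
--
-- def is_out_of_bounds(board,y,x):
--
--     if x >= len(board[0]):
--         return True
--     if x < 0:
--         return True
--     if y >= len(board):
--         return True
--     if y < 0:
--         return True
--     return False
--
-- def detect_row2(board, col, y_start, x_start, length, d_y, d_x):
--     count = 0
--     open_count = 0
--     semi_count = 0
--     closed_count = 0
--     for i in range(len(board)):
--         if not is_out_of_bounds(board, y_start + i *d_y, x_start + i*d_x):
--             if board[y_start + i*d_y][x_start + i*d_x] == col:
--                 count += 1
--             else:
--                 count = 0
--             if not is_out_of_bounds(board,y_start+(i+1)*d_y,x_start+(i+1)*d_x):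
--                 if count == length and board[y_start +(i+1)*d_y][x_start + \
--                 (i+1)*d_x] != col:
--                     y_end = y_start + i*d_y
--                     x_end = x_start + i*d_x
--                     is_bound = is_bounded(board, y_end, x_end, length, d_y, d_x)
--                     if is_bound == "OPEN":
--                         open_count += 1
--                     elif is_bound == "SEMIOPEN":
--                         semi_count += 1
--                     elif is_bound == "CLOSED":
--                         closed_count += 1
--             else:
--                 if count == length:
--                     y_end = y_start + i*d_y
--                     x_end = x_start + i*d_x
--                     is_bound = is_bounded(board, y_end, x_end, length, d_y, d_x)
--                     if is_bound == "OPEN":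
--                         open_count += 1
--                     elif is_bound == "SEMIOPEN":
--                         semi_count += 1
--                     elif is_bound == "CLOSED":
--                         closed_count += 1
--     return open_count, semi_count, closed_count
-- ===== SOURCE B (Python) =====
-- def detect_row2(board, col, y_start, x_start, length, d_y, d_x):
--     # Stateless window scan: for each end index i of the scanned segment, test
--     # directly whether a maximal run of exactly `length` cells of `col` ends at i,
--     # then classify it by counting the empty flanking cells (2 open / 1 semi / 0
--     # closed).  No run of length < 1 (or longer than the segment) exists.
--     n = len(board)
--     if length < 1 or length > n:
--         return 0, 0, 0
--     w = len(board[0]) if board else 0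
--
--     def inb(j):
--         y = y_start + j * d_y
--         x = x_start + j * d_x
--         return 0 <= y < n and 0 <= x < w
--
--     def cell(j):
--         return board[y_start + j * d_y][x_start + j * d_x]
--
--     open_count = semi_count = closed_count = 0
--     for i in range(n):
--         if i + 1 < length:
--             continue  # window would start before the scanned segment
--         if not all(inb(i - t) and cell(i - t) == col for t in range(length)):
--             continue
--         if i - length >= 0 and inb(i - length) and cell(i - length) == col:
--             continue  # run extends further left inside the scanned segment
--         if inb(i + 1) and cell(i + 1) == col:
--             continue  # run continues to the right
--         flanks = (1 if inb(i + 1) and cell(i + 1) == " " else 0) + \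
--                  (1 if inb(i - length) and cell(i - length) == " " else 0)
--         if flanks == 2:
--             open_count += 1
--         elif flanks == 1:
--             semi_count += 1
--         else:
--             closed_count += 1
--     return open_count, semi_count, closed_count
-- ===== Notes on version B (the rewrite author's own statement) =====
-- stated objective: alternative
-- what changed: Replaced A's stateful single pass (running counter reset on mismatch, plus a string-classifying is_bounded helper) by a stateless per-index window test: for each candidate end index check directly that the length cells ending there are the colour, that the run is maximal on both sides, and classify by arithmetically counting empty flanking cells.
-- intended difference: For length = 0 (when some in-bounds cell of the scanned line differs from col and is not followed by an in-bounds col cell) A counts phantom zero-length 'runs' at every such cell - an artefact of its counter starting at 0 - returning nonzero counts; B returns (0, 0, 0), the intended value since no run of length 0 exists. — e.g. on detect_row2([["X"]], "O", 0, 0, 0, 0, 0): A returns (0, 0, 1), B returns (0, 0, 0)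
-- outside the precondition, e.g. on detect_row2([['X', 'O'], ['X']], 'X', 0, 1, 1, -1, 0): A returns (0, 0, 0), B returns (0, 0, 0)
import Mathlib
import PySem

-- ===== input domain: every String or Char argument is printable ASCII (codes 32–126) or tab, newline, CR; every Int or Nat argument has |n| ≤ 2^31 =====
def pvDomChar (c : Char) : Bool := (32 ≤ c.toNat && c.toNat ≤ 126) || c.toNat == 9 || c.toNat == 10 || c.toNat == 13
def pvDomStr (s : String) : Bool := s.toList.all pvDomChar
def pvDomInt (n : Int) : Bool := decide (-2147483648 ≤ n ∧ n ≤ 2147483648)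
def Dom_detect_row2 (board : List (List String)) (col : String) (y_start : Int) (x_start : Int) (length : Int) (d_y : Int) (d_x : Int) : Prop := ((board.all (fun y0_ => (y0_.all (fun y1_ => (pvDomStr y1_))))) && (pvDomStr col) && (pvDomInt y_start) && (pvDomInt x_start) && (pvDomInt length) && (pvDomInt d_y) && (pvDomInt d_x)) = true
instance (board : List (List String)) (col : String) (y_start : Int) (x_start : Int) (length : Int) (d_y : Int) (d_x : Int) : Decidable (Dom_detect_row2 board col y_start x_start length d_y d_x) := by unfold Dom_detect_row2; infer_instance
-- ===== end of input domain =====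

-- B replaces A's stateful counter pass by a stateless per-index maximal-window test with
-- arithmetic flank classification (alternative decomposition; same results except at length = 0,
-- where A counts phantom zero-length runs and B returns (0,0,0)).

set_option maxHeartbeats 1000000


-- ===== PORT A =====
-- board[y][x] after an in-bounds guard: pyGet? with a default never used on guarded paths
def pvIdxA (board : List (List String)) (y : Int) (x : Int) : String :=
  (PySem.List.pyGet? ((PySem.List.pyGet? board y).getD []) x).getD ""

-- Python's len(board[0]) (A only calls this with board nonempty; getD [] is exact there)
def is_out_of_bounds (board : List (List String)) (y : Int) (x : Int) : Bool :=
  if x ≥ (((PySem.List.pyGet? board 0).getD []).length : Int) then true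
  else if x < 0 then true
  else if y ≥ (board.length : Int) then true
  else if y < 0 then true
  else false

def is_bounded (board : List (List String)) (y_end : Int) (x_end : Int) (length : Int) (d_y : Int) (d_x : Int) : String :=
  let count : Int := 0
  let count := if !(is_out_of_bounds board (y_end + d_y) (x_end + d_x)) then
      (if pvIdxA board (y_end + d_y) (x_end + d_x) == " " then count + 1 else count)
    else count
  let count := if !(is_out_of_bounds board (y_end - length * d_y) (x_end - length * d_x)) then
      (if pvIdxA board (y_end - length * d_y) (x_end - length * d_x) == " " then count + 1 else count)
    else count
  if count == 2 then "OPEN" else if count == 1 then "SEMIOPEN" else "CLOSED"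

def detect_row2 (board : List (List String)) (col : String) (y_start : Int) (x_start : Int) (length : Int) (d_y : Int) (d_x : Int) : Int × Int × Int :=
  let st := (List.range board.length).foldl (fun (st : Int × Int × Int × Int) (iN : Nat) =>
    let i : Int := iN
    let (count, open_count, semi_count, closed_count) := st
    if !(is_out_of_bounds board (y_start + i * d_y) (x_start + i * d_x)) then
      let count := if pvIdxA board (y_start + i * d_y) (x_start + i * d_x) == col then count + 1 else (0 : Int)
      if !(is_out_of_bounds board (y_start + (i+1) * d_y) (x_start + (i+1) * d_x)) then
        if count == length && pvIdxA board (y_start + (i+1) * d_y) (x_start + (i+1) * d_x) != col then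
          let is_bound := is_bounded board (y_start + i * d_y) (x_start + i * d_x) length d_y d_x
          if is_bound == "OPEN" then (count, open_count + 1, semi_count, closed_count)
          else if is_bound == "SEMIOPEN" then (count, open_count, semi_count + 1, closed_count)
          else if is_bound == "CLOSED" then (count, open_count, semi_count, closed_count + 1)
          else (count, open_count, semi_count, closed_count)
        else (count, open_count, semi_count, closed_count)
      else
        if count == length then
          let is_bound := is_bounded board (y_start + i * d_y) (x_start + i * d_x) length d_y d_x
          if is_bound == "OPEN" then (count, open_count + 1, semi_count, closed_count)
          else if is_bound == "SEMIOPEN" then (count, open_count, semi_count + 1, closed_count)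
          else if is_bound == "CLOSED" then (count, open_count, semi_count, closed_count + 1)
          else (count, open_count, semi_count, closed_count)
        else (count, open_count, semi_count, closed_count)
    else st) ((0, 0, 0, 0) : Int × Int × Int × Int)
  (st.2.1, st.2.2.1, st.2.2.2)

-- ===== PORT B =====
def pvInbB (n : Int) (w : Int) (y_start : Int) (x_start : Int) (d_y : Int) (d_x : Int) (j : Int) : Bool :=
  decide (0 ≤ y_start + j * d_y) && decide (y_start + j * d_y < n) &&
  decide (0 ≤ x_start + j * d_x) && decide (x_start + j * d_x < w)

def pvCellB (board : List (List String)) (y_start : Int) (x_start : Int) (d_y : Int) (d_x : Int) (j : Int) : String :=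
  (PySem.List.pyGet? ((PySem.List.pyGet? board (y_start + j * d_y)).getD []) (x_start + j * d_x)).getD ""

def detect_row2_alt (board : List (List String)) (col : String) (y_start : Int) (x_start : Int) (length : Int) (d_y : Int) (d_x : Int) : Int × Int × Int :=
  let n : Int := board.length
  if length < 1 || length > n then (0, 0, 0)
  else
    let w : Int := if board.isEmpty then 0 else (((PySem.List.pyGet? board 0).getD []).length : Int)
    (List.range board.length).foldl (fun (st : Int × Int × Int) (iN : Nat) =>
      let i : Int := iN
      if i + 1 < length then st
      else if !((PySem.List.pyRange 0 length 1).all (fun t =>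
          pvInbB n w y_start x_start d_y d_x (i - t) && (pvCellB board y_start x_start d_y d_x (i - t) == col))) then st
      else if decide (i - length ≥ 0) && pvInbB n w y_start x_start d_y d_x (i - length) &&
              (pvCellB board y_start x_start d_y d_x (i - length) == col) then st
      else if pvInbB n w y_start x_start d_y d_x (i + 1) &&
              (pvCellB board y_start x_start d_y d_x (i + 1) == col) then st
      else
        let flanks : Int :=
          (if pvInbB n w y_start x_start d_y d_x (i + 1) && (pvCellB board y_start x_start d_y d_x (i + 1) == " ") then 1 else 0) +
          (if pvInbB n w y_start x_start d_y d_x (i - length) && (pvCellB board y_start x_start d_y d_x (i - length) == " ") then 1 else 0)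
        if flanks == 2 then (st.1 + 1, st.2.1, st.2.2)
        else if flanks == 1 then (st.1, st.2.1 + 1, st.2.2)
        else (st.1, st.2.1, st.2.2 + 1)) ((0, 0, 0) : Int × Int × Int)

-- ===== PRECONDITION & SPEC =====
-- Pre_ excludes ragged boards on which some position the scan can dereference (line indices
-- 0..n and i - length) passes A's bounds check against row 0's width yet lies on a shorter
-- row: exactly there Python A raises IndexError (a few ragged boards whose bad position is
-- never actually dereferenced are also excluded).
def Pre_detect_row2 (board : List (List String)) (col : String) (y_start : Int) (x_start : Int) (length : Int) (d_y : Int) (d_x : Int) : Prop :=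
  ∀ i ∈ List.range (board.length + 1),
    ((0 ≤ y_start + (i : Int) * d_y ∧ y_start + (i : Int) * d_y < (board.length : Int) ∧
      0 ≤ x_start + (i : Int) * d_x ∧ x_start + (i : Int) * d_x < ((board.headD []).length : Int)) →
      x_start + (i : Int) * d_x < ((board.getD (y_start + (i : Int) * d_y).toNat []).length : Int)) ∧
    ((0 ≤ y_start + ((i : Int) - length) * d_y ∧ y_start + ((i : Int) - length) * d_y < (board.length : Int) ∧
      0 ≤ x_start + ((i : Int) - length) * d_x ∧ x_start + ((i : Int) - length) * d_x < ((board.headD []).length : Int)) →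
      x_start + ((i : Int) - length) * d_x < ((board.getD (y_start + ((i : Int) - length) * d_y).toNat []).length : Int))
instance (board : List (List String)) (col : String) (y_start : Int) (x_start : Int) (length : Int) (d_y : Int) (d_x : Int) : Decidable (Pre_detect_row2 board col y_start x_start length d_y d_x) := by unfold Pre_detect_row2; infer_instance

def pvWitness_detect_row2 : List (List String) × String × Int × Int × Int × Int × Int :=
  ([["X", " "], [" ", "X"]], "X", 0, 0, 1, 1, 1)

-- For length = 0 (when some in-bounds cell of the scanned line differs from col and is not
-- followed by an in-bounds col cell) A counts phantom zero-length 'runs' at every such cell —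
-- an artefact of its counter starting at 0 — returning nonzero counts; B returns (0,0,0),
-- the intended value since no run of length 0 exists.
def D_detect_row2 (board : List (List String)) (col : String) (y_start : Int) (x_start : Int) (length : Int) (d_y : Int) (d_x : Int) : Prop :=
  length = 0 ∧ ∃ i ∈ List.range board.length,
    (0 ≤ y_start + (i : Int) * d_y ∧ y_start + (i : Int) * d_y < (board.length : Int) ∧
     0 ≤ x_start + (i : Int) * d_x ∧ x_start + (i : Int) * d_x < ((board.headD []).length : Int)) ∧
    (board.getD (y_start + (i : Int) * d_y).toNat []).getD (x_start + (i : Int) * d_x).toNat "" ≠ col ∧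
    ((0 ≤ y_start + ((i : Int) + 1) * d_y ∧ y_start + ((i : Int) + 1) * d_y < (board.length : Int) ∧
      0 ≤ x_start + ((i : Int) + 1) * d_x ∧ x_start + ((i : Int) + 1) * d_x < ((board.headD []).length : Int)) →
      (board.getD (y_start + ((i : Int) + 1) * d_y).toNat []).getD (x_start + ((i : Int) + 1) * d_x).toNat "" ≠ col)
instance (board : List (List String)) (col : String) (y_start : Int) (x_start : Int) (length : Int) (d_y : Int) (d_x : Int) : Decidable (D_detect_row2 board col y_start x_start length d_y d_x) := by unfold D_detect_row2; infer_instance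

def Spec_detect_row2 (board : List (List String)) (col : String) (y_start : Int) (x_start : Int) (length : Int) (d_y : Int) (d_x : Int) (out : Int × Int × Int) : Prop :=
  ¬ D_detect_row2 board col y_start x_start length d_y d_x → out = detect_row2_alt board col y_start x_start length d_y d_x
instance (board : List (List String)) (col : String) (y_start : Int) (x_start : Int) (length : Int) (d_y : Int) (d_x : Int) (out : Int × Int × Int) : Decidable (Spec_detect_row2 board col y_start x_start length d_y d_x out) := by unfold Spec_detect_row2; infer_instance

def pvDiffWitness_detect_row2 : List (List String) × String × Int × Int × Int × Int × Int :=
  ([["X"]], "O", 0, 0, 0, 0, 0)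
def pvDiffWitnessOut_detect_row2 : (Int × Int × Int) × (Int × Int × Int) := ((0, 0, 1), (0, 0, 0))

-- ===== CLAIM (what is proved, stated in full; the proofs are below) =====
def Claim_unchanged_detect_row2 : Prop := ∀ (board : List (List String)) (col : String) (y_start : Int) (x_start : Int) (length : Int) (d_y : Int) (d_x : Int), Dom_detect_row2 board col y_start x_start length d_y d_x → Pre_detect_row2 board col y_start x_start length d_y d_x → Spec_detect_row2 board col y_start x_start length d_y d_x (detect_row2 board col y_start x_start length d_y d_x)
def Claim_changed_detect_row2 : Prop := Dom_detect_row2 (pvDiffWitness_detect_row2.1) (pvDiffWitness_detect_row2.2.1) (pvDiffWitness_detect_row2.2.2.1) (pvDiffWitness_detect_row2.2.2.2.1) (pvDiffWitness_detect_row2.2.2.2.2.1) (pvDiffWitness_detect_row2.2.2.2.2.2.1) (pvDiffWitness_detect_row2.2.2.2.2.2.2) ∧ Pre_detect_row2 (pvDiffWitness_detect_row2.1) (pvDiffWitness_detect_row2.2.1) (pvDiffWitness_detect_row2.2.2.1) (pvDiffWitness_detect_row2.2.2.2.1) (pvDiffWitness_detect_row2.2.2.2.2.1) (pvDiffWitness_detect_row2.2.2.2.2.2.1)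 (pvDiffWitness_detect_row2.2.2.2.2.2.2) ∧ D_detect_row2 (pvDiffWitness_detect_row2.1) (pvDiffWitness_detect_row2.2.1) (pvDiffWitness_detect_row2.2.2.1) (pvDiffWitness_detect_row2.2.2.2.1) (pvDiffWitness_detect_row2.2.2.2.2.1) (pvDiffWitness_detect_row2.2.2.2.2.2.1) (pvDiffWitness_detect_row2.2.2.2.2.2.2) ∧ detect_row2 (pvDiffWitness_detect_row2.1) (pvDiffWitness_detect_row2.2.1) (pvDiffWitness_detect_row2.2.2.1) (pvDiffWitness_detect_row2.2.2.2.1) (pvDiffWitness_detect_row2.2.2.2.2.1) (pvDiffWitness_detect_row2.2.2.2.2.2.1) (pvDiffWitness_detect_row2.2.2.2.2.2.2) = pvDiffWitnessOut_detect_row2.1 ∧ detect_row2_alt (pvDiffWitness_detect_row2.1) (pvDiffWitness_detect_row2.2.1) (pvDiffWitness_detect_row2.2.2.1) (pvDiffWitness_detect_row2.2.2.2.1) (pvDiffWitness_detect_row2.2.2.2.2.1) (pvDiffWitness_detect_row2.2.2.2.2.2.1) (pvDiffWitness_detect_row2.2.2.2.2.2.2) = pvDiffWitnessOut_detect_row2.2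 ∧ pvDiffWitnessOut_detect_row2.1 ≠ pvDiffWitnessOut_detect_row2.2
def Claim_exact_detect_row2 : Prop := ∀ (board : List (List String)) (col : String) (y_start : Int) (x_start : Int) (length : Int) (d_y : Int) (d_x : Int), Dom_detect_row2 board col y_start x_start length d_y d_x → Pre_detect_row2 board col y_start x_start length d_y d_x → D_detect_row2 board col y_start x_start length d_y d_x → detect_row2 board col y_start x_start length d_y d_x ≠ detect_row2_alt board col y_start x_start length d_y d_x

-- ===== LEMMAS AND PROOFS =====

-- proof-side abbreviations: A's loop step and B's loop step, literal copies of the fold bodies above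
def pvStepA (board : List (List String)) (col : String) (y_start : Int) (x_start : Int) (length : Int) (d_y : Int) (d_x : Int) (st : Int × Int × Int × Int) (iN : Nat) : Int × Int × Int × Int :=
    if !(is_out_of_bounds board (y_start + (iN : Int) * d_y) (x_start + (iN : Int) * d_x)) then
      if !(is_out_of_bounds board (y_start + ((iN : Int)+1) * d_y) (x_start + ((iN : Int)+1) * d_x)) then
        if (if pvIdxA board (y_start + (iN : Int) * d_y) (x_start + (iN : Int) * d_x) == col then st.1 + 1 else (0 : Int)) == length && pvIdxA board (y_start + ((iN : Int)+1) * d_y) (x_start + ((iN : Int)+1) * d_x) != col then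
          if is_bounded board (y_start + (iN : Int) * d_y) (x_start + (iN : Int) * d_x) length d_y d_x == "OPEN" then
            ((if pvIdxA board (y_start + (iN : Int) * d_y) (x_start + (iN : Int) * d_x) == col then st.1 + 1 else (0 : Int)), st.2.1 + 1, st.2.2.1, st.2.2.2)
          else if is_bounded board (y_start + (iN : Int) * d_y) (x_start + (iN : Int) * d_x) length d_y d_x == "SEMIOPEN" then
            ((if pvIdxA board (y_start + (iN : Int) * d_y) (x_start + (iN : Int) * d_x) == col then st.1 + 1 else (0 : Int)), st.2.1, st.2.2.1 + 1, st.2.2.2)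
          else if is_bounded board (y_start + (iN : Int) * d_y) (x_start + (iN : Int) * d_x) length d_y d_x == "CLOSED" then
            ((if pvIdxA board (y_start + (iN : Int) * d_y) (x_start + (iN : Int) * d_x) == col then st.1 + 1 else (0 : Int)), st.2.1, st.2.2.1, st.2.2.2 + 1)
          else ((if pvIdxA board (y_start + (iN : Int) * d_y) (x_start + (iN : Int) * d_x) == col then st.1 + 1 else (0 : Int)), st.2.1, st.2.2.1, st.2.2.2)
        else ((if pvIdxA board (y_start + (iN : Int) * d_y) (x_start + (iN : Int) * d_x) == col then st.1 + 1 else (0 : Int)), st.2.1, st.2.2.1, st.2.2.2)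
      else
        if (if pvIdxA board (y_start + (iN : Int) * d_y) (x_start + (iN : Int) * d_x) == col then st.1 + 1 else (0 : Int)) == length then
          if is_bounded board (y_start + (iN : Int) * d_y) (x_start + (iN : Int) * d_x) length d_y d_x == "OPEN" then
            ((if pvIdxA board (y_start + (iN : Int) * d_y) (x_start + (iN : Int) * d_x) == col then st.1 + 1 else (0 : Int)), st.2.1 + 1, st.2.2.1, st.2.2.2)
          else if is_bounded board (y_start + (iN : Int) * d_y) (x_start + (iN : Int) * d_x) length d_y d_x == "SEMIOPEN" then
            ((if pvIdxA board (y_start + (iN : Int) * d_y) (x_start + (iN : Int) * d_x) == col then st.1 + 1 else (0 : Int)), st.2.1, st.2.2.1 + 1, st.2.2.2)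
          else if is_bounded board (y_start + (iN : Int) * d_y) (x_start + (iN : Int) * d_x) length d_y d_x == "CLOSED" then
            ((if pvIdxA board (y_start + (iN : Int) * d_y) (x_start + (iN : Int) * d_x) == col then st.1 + 1 else (0 : Int)), st.2.1, st.2.2.1, st.2.2.2 + 1)
          else ((if pvIdxA board (y_start + (iN : Int) * d_y) (x_start + (iN : Int) * d_x) == col then st.1 + 1 else (0 : Int)), st.2.1, st.2.2.1, st.2.2.2)
        else ((if pvIdxA board (y_start + (iN : Int) * d_y) (x_start + (iN : Int) * d_x) == col then st.1 + 1 else (0 : Int)), st.2.1, st.2.2.1, st.2.2.2)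
    else st

def pvStepB (board : List (List String)) (col : String) (y_start : Int) (x_start : Int) (length : Int) (d_y : Int) (d_x : Int) (n : Int) (w : Int) (st : Int × Int × Int) (iN : Nat) : Int × Int × Int :=
      let i : Int := iN
      if i + 1 < length then st
      else if !((PySem.List.pyRange 0 length 1).all (fun t =>
          pvInbB n w y_start x_start d_y d_x (i - t) && (pvCellB board y_start x_start d_y d_x (i - t) == col))) then st
      else if decide (i - length ≥ 0) && pvInbB n w y_start x_start d_y d_x (i - length) &&
              (pvCellB board y_start x_start d_y d_x (i - length) == col) then st
      else if pvInbB n w y_start x_start d_y d_x (i + 1) &&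
              (pvCellB board y_start x_start d_y d_x (i + 1) == col) then st
      else
        let flanks : Int :=
          (if pvInbB n w y_start x_start d_y d_x (i + 1) && (pvCellB board y_start x_start d_y d_x (i + 1) == " ") then 1 else 0) +
          (if pvInbB n w y_start x_start d_y d_x (i - length) && (pvCellB board y_start x_start d_y d_x (i - length) == " ") then 1 else 0)
        if flanks == 2 then (st.1 + 1, st.2.1, st.2.2)
        else if flanks == 1 then (st.1, st.2.1 + 1, st.2.2)
        else (st.1, st.2.1, st.2.2 + 1)

theorem detect_row2_eq_fold (board : List (List String)) (col : String) (y_start x_start length d_y d_x : Int) :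
    detect_row2 board col y_start x_start length d_y d_x =
      (let st := (List.range board.length).foldl (pvStepA board col y_start x_start length d_y d_x) ((0,0,0,0) : Int × Int × Int × Int)
       (st.2.1, st.2.2.1, st.2.2.2)) := rfl

theorem detect_row2_alt_eq_fold (board : List (List String)) (col : String) (y_start x_start length d_y d_x : Int)
    (h1 : 1 ≤ length) (h2 : length ≤ (board.length : Int)) :
    detect_row2_alt board col y_start x_start length d_y d_x =
      (List.range board.length).foldl
        (pvStepB board col y_start x_start length d_y d_x (board.length : Int)
          (if board.isEmpty then 0 else (((PySem.List.pyGet? board 0).getD []).length : Int)))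
        ((0,0,0) : Int × Int × Int) := by
  unfold detect_row2_alt
  have : (decide (length < 1) || decide (length > (board.length : Int))) = false := by
    simp only [Bool.or_eq_false_iff, decide_eq_false_iff_not]
    constructor <;> omega
  simp only [this, Bool.false_eq_true, if_false]
  rfl

theorem detect_row2_alt_eq_zero (board : List (List String)) (col : String) (y_start x_start length d_y d_x : Int)
    (h : length < 1 ∨ length > (board.length : Int)) :
    detect_row2_alt board col y_start x_start length d_y d_x = (0, 0, 0) := by
  unfold detect_row2_alt
  have : (decide (length < 1) || decide (length > (board.length : Int))) = true := by
    rcases h with h | h <;> simp [h]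
  simp only [this, if_true]

-- semantic scaffolding: the scanned line (membership + cell), A's running counter,
-- trigger predicate, flank classification, partial sums
def pvLineInb (board : List (List String)) (y_start : Int) (x_start : Int) (d_y : Int) (d_x : Int) (j : Int) : Bool :=
  decide (0 ≤ y_start + j * d_y) && decide (y_start + j * d_y < (board.length : Int)) &&
  decide (0 ≤ x_start + j * d_x) && decide (x_start + j * d_x < ((board.headD []).length : Int))

def pvLineCell (board : List (List String)) (y_start : Int) (x_start : Int) (d_y : Int) (d_x : Int) (j : Int) : String :=
  (PySem.List.pyGet? ((PySem.List.pyGet? board (y_start + j * d_y)).getD []) (x_start + j * d_x)).getD ""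

def pvCnt (board : List (List String)) (col : String) (y_start x_start d_y d_x : Int) : Nat → Int
  | 0 => 0
  | (k+1) => if pvLineInb board y_start x_start d_y d_x (k : Int) = true then
               (if pvLineCell board y_start x_start d_y d_x (k : Int) = col then
                  pvCnt board col y_start x_start d_y d_x k + 1 else 0)
             else pvCnt board col y_start x_start d_y d_x k

abbrev pvTrig (board : List (List String)) (col : String) (y_start x_start length d_y d_x : Int) (k : Nat) : Prop :=
  pvLineInb board y_start x_start d_y d_x (k : Int) = true ∧
  pvCnt board col y_start x_start d_y d_x (k+1) = length ∧
  ¬(pvLineInb board y_start x_start d_y d_x ((k : Int) + 1) = true ∧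
    pvLineCell board y_start x_start d_y d_x ((k : Int) + 1) = col)

def pvClass (board : List (List String)) (y_start x_start length d_y d_x : Int) (i : Int) : Int × Int × Int :=
  let f : Int :=
    (if pvLineInb board y_start x_start d_y d_x (i + 1) = true ∧ pvLineCell board y_start x_start d_y d_x (i + 1) = " " then 1 else 0) +
    (if pvLineInb board y_start x_start d_y d_x (i - length) = true ∧ pvLineCell board y_start x_start d_y d_x (i - length) = " " then 1 else 0)
  if f = 2 then (1, 0, 0) else if f = 1 then (0, 1, 0) else (0, 0, 1)

def pvSA (board : List (List String)) (col : String) (y_start x_start length d_y d_x : Int) : Nat → Int × Int × Int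
  | 0 => (0, 0, 0)
  | (k+1) =>
    let s := pvSA board col y_start x_start length d_y d_x k
    if pvTrig board col y_start x_start length d_y d_x k then
      let c := pvClass board y_start x_start length d_y d_x (k : Int)
      (s.1 + c.1, s.2.1 + c.2.1, s.2.2 + c.2.2)
    else s

theorem pvHead0 (board : List (List String)) : (PySem.List.pyGet? board 0).getD [] = board.headD [] := by
  cases board <;> simp [PySem.List.pyGet?, PySem.List.pyIdx?]

theorem oob_eq (board : List (List String)) (y x : Int) :
    is_out_of_bounds board y x =
      !(decide (0 ≤ y) && decide (y < (board.length : Int)) && decide (0 ≤ x) && decide (x < ((board.headD []).length : Int))) := by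
  unfold is_out_of_bounds
  rw [pvHead0]
  split_ifs with h1 h2 h3 h4 <;> simp_all <;> omega

theorem oob_line (board : List (List String)) (y_start x_start d_y d_x j : Int) :
    is_out_of_bounds board (y_start + j * d_y) (x_start + j * d_x) =
      !(pvLineInb board y_start x_start d_y d_x j) := by
  rw [oob_eq]; rfl

theorem cellA_line (board : List (List String)) (y_start x_start d_y d_x j : Int) :
    pvIdxA board (y_start + j * d_y) (x_start + j * d_x) = pvLineCell board y_start x_start d_y d_x j := rfl

theorem cellB_line (board : List (List String)) (y_start x_start d_y d_x j : Int) :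
    pvCellB board y_start x_start d_y d_x j = pvLineCell board y_start x_start d_y d_x j := rfl

theorem inbB_line (board : List (List String)) (y_start x_start d_y d_x j : Int) :
    pvInbB (board.length : Int) (if board.isEmpty then 0 else (((PySem.List.pyGet? board 0).getD []).length : Int)) y_start x_start d_y d_x j
      = pvLineInb board y_start x_start d_y d_x j := by
  cases board <;> simp [pvInbB, pvLineInb, PySem.List.pyGet?, PySem.List.pyIdx?]

theorem cnt_nonneg (board : List (List String)) (col : String) (y_start x_start d_y d_x : Int) (k : Nat) :
    0 ≤ pvCnt board col y_start x_start d_y d_x k := by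
  induction k with
  | zero => simp [pvCnt]
  | succ k ih => unfold pvCnt; split_ifs <;> omega

theorem cnt_le (board : List (List String)) (col : String) (y_start x_start d_y d_x : Int) (k : Nat) :
    pvCnt board col y_start x_start d_y d_x k ≤ (k : Int) := by
  induction k with
  | zero => simp [pvCnt]
  | succ k ih => unfold pvCnt; split_ifs <;> push_cast <;> omega

theorem pv_between {c d j1 j j2 : Int} (hl : j1 ≤ j) (hr : j ≤ j2)
    (h1 : 0 ≤ c + j1 * d) (h2 : 0 ≤ c + j2 * d) : 0 ≤ c + j * d := by
  by_cases hd : 0 ≤ d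
  · have := mul_le_mul_of_nonneg_right hl hd
    linarith
  · push_neg at hd
    have := mul_le_mul_of_nonpos_right hr hd.le
    linarith

theorem contig (board : List (List String)) (y_start x_start d_y d_x : Int) {j1 j j2 : Int}
    (h1 : pvLineInb board y_start x_start d_y d_x j1 = true)
    (h2 : pvLineInb board y_start x_start d_y d_x j2 = true)
    (hl : j1 ≤ j) (hr : j ≤ j2) :
    pvLineInb board y_start x_start d_y d_x j = true := by
  simp only [pvLineInb, Bool.and_eq_true, decide_eq_true_eq] at *
  obtain ⟨⟨⟨a1, b1⟩, c1⟩, d1⟩ := h1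
  obtain ⟨⟨⟨a2, b2⟩, c2⟩, d2⟩ := h2
  refine ⟨⟨⟨pv_between hl hr a1 a2, ?_⟩, pv_between hl hr c1 c2⟩, ?_⟩
  · have := pv_between (c := (board.length : Int) - 1 - y_start) (d := -d_y) hl hr
      (by nlinarith) (by nlinarith)
    nlinarith
  · have := pv_between (c := ((board.headD []).length : Int) - 1 - x_start) (d := -d_x) hl hr
      (by nlinarith) (by nlinarith)
    nlinarith

theorem cnt_zero_of_oob (board : List (List String)) (col : String) (y_start x_start d_y d_x : Int) (m : Nat)
    (h : ∀ j : Nat, j < m → pvLineInb board y_start x_start d_y d_x (j : Int) ≠ true) :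
    pvCnt board col y_start x_start d_y d_x m = 0 := by
  induction m with
  | zero => simp [pvCnt]
  | succ m ih =>
    unfold pvCnt
    have hm := h m (by omega)
    simp only [hm, Bool.false_eq_true, if_false]
    exact ih (fun j hj => h j (by omega))

-- cnt = length iff an exact maximal-left window of col cells ends at k (the crux, by induction)
theorem cnt_char (board : List (List String)) (col : String) (y_start x_start d_y d_x : Int) :
    ∀ (k : Nat) (length : Int), 1 ≤ length →
    pvLineInb board y_start x_start d_y d_x (k : Int) = true →
    (pvCnt board col y_start x_start d_y d_x (k+1) = length ↔
      (length ≤ (k : Int) + 1 ∧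
       (∀ t : Int, 0 ≤ t → t < length →
          pvLineInb board y_start x_start d_y d_x ((k : Int) - t) = true ∧
          pvLineCell board y_start x_start d_y d_x ((k : Int) - t) = col) ∧
       ((k : Int) - length ≥ 0 →
          ¬(pvLineInb board y_start x_start d_y d_x ((k : Int) - length) = true ∧
            pvLineCell board y_start x_start d_y d_x ((k : Int) - length) = col)))) := by
  intro k
  induction k with
  | zero =>
    intro length hL hin
    simp only [Nat.cast_zero] at hin
    simp only [Nat.cast_zero, pvCnt, hin, if_true]
    by_cases hc : pvLineCell board y_start x_start d_y d_x (0 : Int) = col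
    · simp only [hc, if_true]
      constructor
      · rintro rfl
        refine ⟨by omega, ?_, fun h => absurd h (by omega)⟩
        intro t ht0 ht1
        have : t = 0 := by omega
        subst this; simpa using ⟨hin, hc⟩
      · rintro ⟨h1, h2, h3⟩
        omega
    · simp only [hc, if_false]
      constructor
      · omega
      · rintro ⟨h1, h2, h3⟩
        exact absurd (h2 0 le_rfl (by omega)).2 (by simpa using hc)
  | succ k ih =>
    intro length hL hin
    have hcast : ((k+1 : Nat) : Int) = (k : Int) + 1 := by push_cast; ring
    rw [hcast] at hin
    have hcnt : pvCnt board col y_start x_start d_y d_x (k+1+1) =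
        (if pvLineCell board y_start x_start d_y d_x ((k : Int) + 1) = col then
          pvCnt board col y_start x_start d_y d_x (k+1) + 1 else 0) := by
      conv_lhs => rw [pvCnt]
      rw [hcast]
      simp only [hin, if_true]
    rw [hcast]
    by_cases hc : pvLineCell board y_start x_start d_y d_x ((k : Int) + 1) = col
    · rw [hcnt]; simp only [hc, if_true]
      by_cases hik : pvLineInb board y_start x_start d_y d_x (k : Int) = true
      · by_cases hL1 : length = 1
        · subst hL1
          have h0 : pvCnt board col y_start x_start d_y d_x (k+1) + 1 = 1 ↔
              pvCnt board col y_start x_start d_y d_x (k+1) = 0 := by omega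
          rw [h0]
          have hcz : pvCnt board col y_start x_start d_y d_x (k+1) = 0 ↔
              ¬ pvLineCell board y_start x_start d_y d_x (k : Int) = col := by
            unfold pvCnt
            simp only [hik, if_true]
            split_ifs with h
            · have := cnt_nonneg board col y_start x_start d_y d_x k
              constructor
              · intro hx; omega
              · intro hx; exact absurd h hx
            · simp [h]
          rw [hcz]
          constructor
          · intro hnc
            refine ⟨by omega, ?_, ?_⟩
            · intro t ht0 ht1
              have : t = 0 := by omega
              subst this
              simpa using ⟨hin, hc⟩
            · intro _
              have : (k : Int) + 1 - 1 = (k : Int) := by ring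
              rw [this]
              rintro ⟨_, hcol⟩
              exact hnc hcol
          · rintro ⟨_, _, h3⟩
            have : (k : Int) + 1 - 1 = (k : Int) := by ring
            rw [this] at h3
            intro hcol
            exact (h3 (by omega)) ⟨hik, hcol⟩
        · have hL2 : 2 ≤ length := by omega
          have hIH := ih (length - 1) (by omega) hik
          have hstep : pvCnt board col y_start x_start d_y d_x (k+1) + 1 = length ↔
              pvCnt board col y_start x_start d_y d_x (k+1) = length - 1 := by omega
          rw [hstep, hIH]
          constructor
          · rintro ⟨h1, h2, h3⟩
            refine ⟨by omega, ?_, ?_⟩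
            · intro t ht0 ht1
              by_cases ht : t = 0
              · subst ht; simpa using ⟨hin, hc⟩
              · have := h2 (t - 1) (by omega) (by omega)
                have heq : (k : Int) - (t - 1) = (k : Int) + 1 - t := by ring
                rw [heq] at this
                exact this
            · intro hge
              have := h3 (by omega)
              have heq : (k : Int) - (length - 1) = (k : Int) + 1 - length := by ring
              rw [heq] at this
              exact this
          · rintro ⟨h1, h2, h3⟩
            refine ⟨by omega, ?_, ?_⟩
            · intro t ht0 ht1
              have := h2 (t + 1) (by omega) (by omega)
              have heq : (k : Int) + 1 - (t + 1) = (k : Int) - t := by ring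
              rw [heq] at this
              exact this
            · intro hge
              have := h3 (by omega)
              have heq : (k : Int) + 1 - length = (k : Int) - (length - 1) := by ring
              rw [heq] at this
              exact this
      · have hall : ∀ j : Nat, j < k + 1 → pvLineInb board y_start x_start d_y d_x (j : Int) ≠ true := by
          intro j hj hinj
          exact hik (contig board y_start x_start d_y d_x hinj hin
            (by exact_mod_cast Nat.cast_le.2 (by omega)) (by push_cast; omega))
        have hz : pvCnt board col y_start x_start d_y d_x (k+1) = 0 :=
          cnt_zero_of_oob board col y_start x_start d_y d_x (k+1) hall
        rw [hz]
        constructor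
        · intro h1
          have hL1 : length = 1 := by omega
          subst hL1
          refine ⟨by omega, ?_, ?_⟩
          · intro t ht0 ht1
            have : t = 0 := by omega
            subst this; simpa using ⟨hin, hc⟩
          · intro _
            have : (k : Int) + 1 - 1 = (k : Int) := by ring
            rw [this]
            rintro ⟨hinb, _⟩
            exact hik hinb
        · rintro ⟨h1, h2, h3⟩
          by_cases hL1 : length = 1
          · omega
          · have := (h2 1 (by omega) (by omega)).1
            have heq : (k : Int) + 1 - 1 = (k : Int) := by ring
            rw [heq] at this
            exact absurd this hik
    · rw [hcnt]; simp only [hc, if_false]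
      constructor
      · intro h; omega
      · rintro ⟨h1, h2, h3⟩
        exact absurd (h2 0 le_rfl (by omega)).2 (by simpa using hc)

-- A's trigger-classification block adds exactly the pvClass contribution
theorem classA (board : List (List String)) (y_start x_start length d_y d_x i c o s cl : Int) :
    (if (is_bounded board (y_start + i * d_y) (x_start + i * d_x) length d_y d_x == "OPEN") = true then (c, o + 1, s, cl)
     else if (is_bounded board (y_start + i * d_y) (x_start + i * d_x) length d_y d_x == "SEMIOPEN") = true then (c, o, s + 1, cl)
     else if (is_bounded board (y_start + i * d_y) (x_start + i * d_x) length d_y d_x == "CLOSED") = true then (c, o, s, cl + 1)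
     else ((c, o, s, cl) : Int × Int × Int × Int)) =
    (c, o + (pvClass board y_start x_start length d_y d_x i).1,
        s + (pvClass board y_start x_start length d_y d_x i).2.1,
        cl + (pvClass board y_start x_start length d_y d_x i).2.2) := by
  have e1 : y_start + i * d_y + d_y = y_start + (i + 1) * d_y := by ring
  have e2 : x_start + i * d_x + d_x = x_start + (i + 1) * d_x := by ring
  have e3 : y_start + i * d_y - length * d_y = y_start + (i - length) * d_y := by ring
  have e4 : x_start + i * d_x - length * d_x = x_start + (i - length) * d_x := by ring
  unfold is_bounded pvClass
  rw [e1, e2, e3, e4, oob_line, oob_line]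
  simp only [cellA_line, beq_iff_eq]
  by_cases p1 : pvLineInb board y_start x_start d_y d_x (i + 1) = true <;>
    by_cases q1 : pvLineCell board y_start x_start d_y d_x (i + 1) = " " <;>
      by_cases p2 : pvLineInb board y_start x_start d_y d_x (i - length) = true <;>
        by_cases q2 : pvLineCell board y_start x_start d_y d_x (i - length) = " " <;>
          simp [p1, q1, p2, q2]

-- one step of A's loop, semantically
theorem stepA_spec (board : List (List String)) (col : String) (y_start x_start length d_y d_x : Int) (k : Nat) (o s cl : Int) :
    pvStepA board col y_start x_start length d_y d_x
        (pvCnt board col y_start x_start d_y d_x k, o, s, cl) k =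
      (if pvTrig board col y_start x_start length d_y d_x k then
        (pvCnt board col y_start x_start d_y d_x (k+1),
         o + (pvClass board y_start x_start length d_y d_x (k : Int)).1,
         s + (pvClass board y_start x_start length d_y d_x (k : Int)).2.1,
         cl + (pvClass board y_start x_start length d_y d_x (k : Int)).2.2)
      else (pvCnt board col y_start x_start d_y d_x (k+1), o, s, cl)) := by
  unfold pvStepA
  simp only [oob_line, cellA_line]
  by_cases hin : pvLineInb board y_start x_start d_y d_x (k : Int) = true
  case neg =>
    rw [Bool.not_eq_true] at hin
    have htrig : ¬ pvTrig board col y_start x_start length d_y d_x k := by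
      rintro ⟨h, _, _⟩; rw [hin] at h; exact Bool.false_ne_true h
    have hsame : pvCnt board col y_start x_start d_y d_x (k+1) =
        pvCnt board col y_start x_start d_y d_x k := by
      conv_lhs => rw [pvCnt]
      simp [hin]
    simp only [hin, Bool.not_false, Bool.not_true, Bool.false_eq_true, if_false]
    rw [if_neg htrig, hsame]
  case pos =>
    have hc' : (if (pvLineCell board y_start x_start d_y d_x (k : Int) == col) = true then
          pvCnt board col y_start x_start d_y d_x k + 1 else 0) =
        pvCnt board col y_start x_start d_y d_x (k+1) := by
      conv_rhs => rw [pvCnt]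
      simp [hin, beq_iff_eq]
    simp only [hin, Bool.not_true, Bool.not_false]
    rw [hc']
    by_cases hin2 : pvLineInb board y_start x_start d_y d_x ((k : Int) + 1) = true
    · simp only [hin2, Bool.not_true, Bool.not_false]
      by_cases hceq : pvCnt board col y_start x_start d_y d_x (k+1) = length
      · by_cases hc2 : pvLineCell board y_start x_start d_y d_x ((k : Int) + 1) = col
        · have hb : (pvCnt board col y_start x_start d_y d_x (k+1) == length &&
              (pvLineCell board y_start x_start d_y d_x ((k : Int) + 1) != col)) = false := by
            simp [hceq, hc2]
          have htrig : ¬ pvTrig board col y_start x_start length d_y d_x k := by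
            rintro ⟨_, _, hx⟩; exact hx ⟨hin2, hc2⟩
          rw [hb, if_neg htrig]
          rfl
        · have hb : (pvCnt board col y_start x_start d_y d_x (k+1) == length &&
              (pvLineCell board y_start x_start d_y d_x ((k : Int) + 1) != col)) = true := by
            simp [hceq, hc2]
          have htrig : pvTrig board col y_start x_start length d_y d_x k :=
            ⟨hin, hceq, fun hx => hc2 hx.2⟩
          rw [hb, if_pos htrig]
          show (if (is_bounded board (y_start + (k : Int) * d_y) (x_start + (k : Int) * d_x) length d_y d_x == "OPEN") = true then
              (pvCnt board col y_start x_start d_y d_x (k+1), o + 1, s, cl)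
            else if (is_bounded board (y_start + (k : Int) * d_y) (x_start + (k : Int) * d_x) length d_y d_x == "SEMIOPEN") = true then
              (pvCnt board col y_start x_start d_y d_x (k+1), o, s + 1, cl)
            else if (is_bounded board (y_start + (k : Int) * d_y) (x_start + (k : Int) * d_x) length d_y d_x == "CLOSED") = true then
              (pvCnt board col y_start x_start d_y d_x (k+1), o, s, cl + 1)
            else (pvCnt board col y_start x_start d_y d_x (k+1), o, s, cl)) = _
          rw [classA]
      · have hb : (pvCnt board col y_start x_start d_y d_x (k+1) == length &&
            (pvLineCell board y_start x_start d_y d_x ((k : Int) + 1) != col)) = false := by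
          simp [hceq]
        have htrig : ¬ pvTrig board col y_start x_start length d_y d_x k := by
          rintro ⟨_, hx, _⟩; exact hceq hx
        rw [hb, if_neg htrig]
        rfl
    · rw [Bool.not_eq_true] at hin2
      simp only [hin2, Bool.not_true, Bool.not_false]
      by_cases hceq : pvCnt board col y_start x_start d_y d_x (k+1) = length
      · have htrig : pvTrig board col y_start x_start length d_y d_x k :=
          ⟨hin, hceq, fun hx => by rw [hin2] at hx; exact Bool.false_ne_true hx.1⟩
        have hb : (pvCnt board col y_start x_start d_y d_x (k+1) == length) = true := by
          simp [hceq]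
        rw [hb, if_pos htrig]
        show (if (is_bounded board (y_start + (k : Int) * d_y) (x_start + (k : Int) * d_x) length d_y d_x == "OPEN") = true then
            (pvCnt board col y_start x_start d_y d_x (k+1), o + 1, s, cl)
          else if (is_bounded board (y_start + (k : Int) * d_y) (x_start + (k : Int) * d_x) length d_y d_x == "SEMIOPEN") = true then
            (pvCnt board col y_start x_start d_y d_x (k+1), o, s + 1, cl)
          else if (is_bounded board (y_start + (k : Int) * d_y) (x_start + (k : Int) * d_x) length d_y d_x == "CLOSED") = true then
            (pvCnt board col y_start x_start d_y d_x (k+1), o, s, cl + 1)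
          else (pvCnt board col y_start x_start d_y d_x (k+1), o, s, cl)) = _
        rw [classA]
      · have htrig : ¬ pvTrig board col y_start x_start length d_y d_x k := by
          rintro ⟨_, hx, _⟩; exact hceq hx
        have hb : (pvCnt board col y_start x_start d_y d_x (k+1) == length) = false := by
          simp [hceq]
        rw [hb, if_neg htrig]
        rfl

-- A's whole loop in terms of pvCnt and pvSA
theorem A_loop (board : List (List String)) (col : String) (y_start x_start length d_y d_x : Int) (k : Nat) :
    (List.range k).foldl (pvStepA board col y_start x_start length d_y d_x) ((0,0,0,0) : Int × Int × Int × Int) =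
      (pvCnt board col y_start x_start d_y d_x k,
       (pvSA board col y_start x_start length d_y d_x k).1,
       (pvSA board col y_start x_start length d_y d_x k).2.1,
       (pvSA board col y_start x_start length d_y d_x k).2.2) := by
  induction k with
  | zero => simp [pvCnt, pvSA]
  | succ k ih =>
    rw [List.range_succ, List.foldl_append, ih, List.foldl_cons, List.foldl_nil, stepA_spec]
    simp only [pvSA]
    by_cases h : pvTrig board col y_start x_start length d_y d_x k
    · rw [if_pos h, if_pos h]
    · rw [if_neg h, if_neg h]

-- B's trigger condition equals A's trigger (via the counter characterization)
theorem trig_iff (board : List (List String)) (col : String) (y_start x_start length d_y d_x : Int)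
    (hL : 1 ≤ length) (k : Nat) :
    pvTrig board col y_start x_start length d_y d_x k ↔
      (length ≤ (k : Int) + 1 ∧
       (∀ t : Int, 0 ≤ t → t < length →
          pvLineInb board y_start x_start d_y d_x ((k : Int) - t) = true ∧
          pvLineCell board y_start x_start d_y d_x ((k : Int) - t) = col) ∧
       ¬((k : Int) - length ≥ 0 ∧ pvLineInb board y_start x_start d_y d_x ((k : Int) - length) = true ∧
          pvLineCell board y_start x_start d_y d_x ((k : Int) - length) = col) ∧
       ¬(pvLineInb board y_start x_start d_y d_x ((k : Int) + 1) = true ∧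
          pvLineCell board y_start x_start d_y d_x ((k : Int) + 1) = col)) := by
  constructor
  · rintro ⟨hin, hcnt, hnext⟩
    obtain ⟨h1, h2, h3⟩ := (cnt_char board col y_start x_start d_y d_x k length hL hin).1 hcnt
    exact ⟨h1, h2, fun hx => (h3 hx.1) ⟨hx.2.1, hx.2.2⟩, hnext⟩
  · rintro ⟨h1, h2, h3, h4⟩
    have hin : pvLineInb board y_start x_start d_y d_x (k : Int) = true := by
      have := (h2 0 le_rfl (by omega)).1
      simpa using this
    refine ⟨hin, ?_, h4⟩
    exact (cnt_char board col y_start x_start d_y d_x k length hL hin).2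
      ⟨h1, h2, fun hge hP => h3 ⟨hge, hP.1, hP.2⟩⟩

theorem andBeq_eq (b : Bool) (s v : String) (h : b = true ∧ s = v) : (b && (s == v)) = true := by
  simp [h.1, h.2]

theorem andBeq_ne (b : Bool) (s v : String) (h : ¬(b = true ∧ s = v)) : (b && (s == v)) = false := by
  by_contra hx
  rw [Bool.not_eq_false] at hx
  simp only [Bool.and_eq_true, beq_iff_eq] at hx
  exact h hx

-- one step of B's loop, semantically (same contribution as A's step)
theorem stepB_spec (board : List (List String)) (col : String) (y_start x_start length d_y d_x : Int)
    (hL : 1 ≤ length) (k : Nat) (st : Int × Int × Int) :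
    pvStepB board col y_start x_start length d_y d_x (board.length : Int)
        (if board.isEmpty then 0 else (((PySem.List.pyGet? board 0).getD []).length : Int)) st k =
      (if pvTrig board col y_start x_start length d_y d_x k then
        (st.1 + (pvClass board y_start x_start length d_y d_x (k : Int)).1,
         st.2.1 + (pvClass board y_start x_start length d_y d_x (k : Int)).2.1,
         st.2.2 + (pvClass board y_start x_start length d_y d_x (k : Int)).2.2)
      else st) := by
  have htrig := trig_iff board col y_start x_start length d_y d_x hL k
  unfold pvStepB
  simp only [inbB_line, cellB_line]
  by_cases hg : (k : Int) + 1 < length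
  · rw [if_pos hg, if_neg]
    intro htr
    obtain ⟨h1, _, _, _⟩ := htrig.1 htr
    omega
  · rw [if_neg hg]
    by_cases hall : ((PySem.List.pyRange 0 length 1).all (fun t =>
        pvLineInb board y_start x_start d_y d_x ((k : Int) - t) &&
        (pvLineCell board y_start x_start d_y d_x ((k : Int) - t) == col))) = true
    · have hw : ∀ t : Int, 0 ≤ t → t < length →
          pvLineInb board y_start x_start d_y d_x ((k : Int) - t) = true ∧
          pvLineCell board y_start x_start d_y d_x ((k : Int) - t) = col := by
        intro t ht0 ht1
        have := List.all_eq_true.1 hall t (by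
          rw [PySem.List.mem_pyRange_one]; exact ⟨ht0, ht1⟩)
        simpa [Bool.and_eq_true, beq_iff_eq] using this
      rw [hall]
      simp only [Bool.not_true, ite_false]
      by_cases hS : ((k : Int) - length ≥ 0 ∧
          pvLineInb board y_start x_start d_y d_x ((k : Int) - length) = true ∧
          pvLineCell board y_start x_start d_y d_x ((k : Int) - length) = col)
      · have hb : (decide ((k : Int) - length ≥ 0) &&
            pvLineInb board y_start x_start d_y d_x ((k : Int) - length) &&
            (pvLineCell board y_start x_start d_y d_x ((k : Int) - length) == col)) = true := by
          have h0 := hS.1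
          simp [hS.2.1, hS.2.2]
          omega
        rw [hb, if_neg (fun hx => ((htrig.1 hx).2.2.1) hS)]
        rfl
      · have hb : (decide ((k : Int) - length ≥ 0) &&
            pvLineInb board y_start x_start d_y d_x ((k : Int) - length) &&
            (pvLineCell board y_start x_start d_y d_x ((k : Int) - length) == col)) = false := by
          by_contra hx
          rw [Bool.not_eq_false] at hx
          simp only [Bool.and_eq_true, decide_eq_true_eq, beq_iff_eq] at hx
          exact hS ⟨hx.1.1, hx.1.2, hx.2⟩
        rw [hb]
        simp only [Bool.false_eq_true, if_false]
        by_cases hR : (pvLineInb board y_start x_start d_y d_x ((k : Int) + 1) = true ∧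
            pvLineCell board y_start x_start d_y d_x ((k : Int) + 1) = col)
        · have hb2 : (pvLineInb board y_start x_start d_y d_x ((k : Int) + 1) &&
              (pvLineCell board y_start x_start d_y d_x ((k : Int) + 1) == col)) = true := by
            simp [hR.1, hR.2]
          rw [hb2, if_neg (fun hx => ((htrig.1 hx).2.2.2) hR)]
          rfl
        · have hb2 : (pvLineInb board y_start x_start d_y d_x ((k : Int) + 1) &&
              (pvLineCell board y_start x_start d_y d_x ((k : Int) + 1) == col)) = false := by
            by_contra hx
            rw [Bool.not_eq_false] at hx
            simp only [Bool.and_eq_true, beq_iff_eq] at hx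
            exact hR ⟨hx.1, hx.2⟩
          rw [hb2]
          simp only [Bool.false_eq_true, if_false]
          rw [if_pos (htrig.2 ⟨by omega, hw, hS, hR⟩)]
          unfold pvClass
          by_cases f1 : (pvLineInb board y_start x_start d_y d_x ((k : Int) + 1) = true ∧
              pvLineCell board y_start x_start d_y d_x ((k : Int) + 1) = " ")
          · by_cases f2 : (pvLineInb board y_start x_start d_y d_x ((k : Int) - length) = true ∧
                pvLineCell board y_start x_start d_y d_x ((k : Int) - length) = " ")
            · rw [andBeq_eq _ _ _ f1, andBeq_eq _ _ _ f2, if_pos f1, if_pos f2]; norm_num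
            · rw [andBeq_eq _ _ _ f1, andBeq_ne _ _ _ f2, if_pos f1, if_neg f2]; norm_num
          · by_cases f2 : (pvLineInb board y_start x_start d_y d_x ((k : Int) - length) = true ∧
                pvLineCell board y_start x_start d_y d_x ((k : Int) - length) = " ")
            · rw [andBeq_ne _ _ _ f1, andBeq_eq _ _ _ f2, if_neg f1, if_pos f2]; norm_num
            · rw [andBeq_ne _ _ _ f1, andBeq_ne _ _ _ f2, if_neg f1, if_neg f2]; norm_num
    · have hw : ¬ ∀ t : Int, 0 ≤ t → t < length →
          pvLineInb board y_start x_start d_y d_x ((k : Int) - t) = true ∧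
          pvLineCell board y_start x_start d_y d_x ((k : Int) - t) = col := by
        intro hforall
        apply hall
        rw [List.all_eq_true]
        intro t ht
        rw [PySem.List.mem_pyRange_one] at ht
        have := hforall t ht.1 ht.2
        simp [this.1, this.2]
      rw [Bool.not_eq_true] at hall
      rw [hall]
      simp only [Bool.not_false, ite_true]
      rw [if_neg]
      intro htr
      exact hw (htrig.1 htr).2.1

-- B's whole loop in terms of pvSA
theorem B_loop (board : List (List String)) (col : String) (y_start x_start length d_y d_x : Int)
    (hL : 1 ≤ length) (k : Nat) :
    (List.range k).foldl
        (pvStepB board col y_start x_start length d_y d_x (board.length : Int)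
          (if board.isEmpty then 0 else (((PySem.List.pyGet? board 0).getD []).length : Int)))
        ((0,0,0) : Int × Int × Int) =
      pvSA board col y_start x_start length d_y d_x k := by
  induction k with
  | zero => simp [pvSA]
  | succ k ih =>
    rw [List.range_succ, List.foldl_append, ih, List.foldl_cons, List.foldl_nil,
      stepB_spec board col y_start x_start length d_y d_x hL]
    simp only [pvSA]

-- pvSA vanishes when nothing triggers
theorem pvSA_of_no_trig (board : List (List String)) (col : String) (y_start x_start length d_y d_x : Int)
    (m : Nat) (h : ∀ k : Nat, k < m → ¬ pvTrig board col y_start x_start length d_y d_x k) :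
    pvSA board col y_start x_start length d_y d_x m = (0, 0, 0) := by
  induction m with
  | zero => rfl
  | succ m ih =>
    unfold pvSA
    rw [if_neg (h m (by omega)), ih (fun k hk => h k (by omega))]

theorem pvClass_facts (board : List (List String)) (y_start x_start length d_y d_x i : Int) :
    (pvClass board y_start x_start length d_y d_x i).1 +
      (pvClass board y_start x_start length d_y d_x i).2.1 +
      (pvClass board y_start x_start length d_y d_x i).2.2 = 1 ∧
    0 ≤ (pvClass board y_start x_start length d_y d_x i).1 ∧
    0 ≤ (pvClass board y_start x_start length d_y d_x i).2.1 ∧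
    0 ≤ (pvClass board y_start x_start length d_y d_x i).2.2 := by
  unfold pvClass
  split_ifs <;> norm_num

theorem pvSA_nonneg (board : List (List String)) (col : String) (y_start x_start length d_y d_x : Int) (m : Nat) :
    0 ≤ (pvSA board col y_start x_start length d_y d_x m).1 ∧
    0 ≤ (pvSA board col y_start x_start length d_y d_x m).2.1 ∧
    0 ≤ (pvSA board col y_start x_start length d_y d_x m).2.2 := by
  induction m with
  | zero => simp [pvSA]
  | succ m ih =>
    have hc := pvClass_facts board y_start x_start length d_y d_x (m : Int)
    unfold pvSA
    split_ifs <;> simp only [] <;> exact ⟨by omega, by omega, by omega⟩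

-- a trigger inside the scan forces a strictly positive total
theorem pvSA_pos (board : List (List String)) (col : String) (y_start x_start length d_y d_x : Int)
    (k m : Nat) (hk : k < m) (ht : pvTrig board col y_start x_start length d_y d_x k) :
    1 ≤ (pvSA board col y_start x_start length d_y d_x m).1 +
        (pvSA board col y_start x_start length d_y d_x m).2.1 +
        (pvSA board col y_start x_start length d_y d_x m).2.2 := by
  induction m with
  | zero => omega
  | succ m ih =>
    have hc := pvClass_facts board y_start x_start length d_y d_x (m : Int)
    have hs := pvSA_nonneg board col y_start x_start length d_y d_x m
    by_cases hkm : k < m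
    · have := ih hkm
      unfold pvSA
      split_ifs <;> simp only [] <;> omega
    · have hkeq : k = m := by omega
      subst hkeq
      unfold pvSA
      rw [if_pos ht]
      simp only []
      omega

-- with length = 0, a trigger is exactly a mismatch cell not followed by a col cell
theorem trig_zero_iff (board : List (List String)) (col : String) (y_start x_start d_y d_x : Int) (k : Nat) :
    pvTrig board col y_start x_start 0 d_y d_x k ↔
      (pvLineInb board y_start x_start d_y d_x (k : Int) = true ∧
       pvLineCell board y_start x_start d_y d_x (k : Int) ≠ col ∧
       (pvLineInb board y_start x_start d_y d_x ((k : Int) + 1) = true →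
         pvLineCell board y_start x_start d_y d_x ((k : Int) + 1) ≠ col)) := by
  constructor
  · rintro ⟨hin, hcnt, hnext⟩
    refine ⟨hin, ?_, fun h1 h2 => hnext ⟨h1, h2⟩⟩
    intro hc
    have hnn := cnt_nonneg board col y_start x_start d_y d_x k
    unfold pvCnt at hcnt
    rw [if_pos hin, if_pos hc] at hcnt
    omega
  · rintro ⟨hin, hc, hnext⟩
    refine ⟨hin, ?_, fun hx => hnext hx.1 hx.2⟩
    unfold pvCnt
    rw [if_pos hin, if_neg hc]

-- bridge between D_'s closed-form cell reads and the line cell of the ports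
theorem cell_bridge (board : List (List String)) (y x : Int) (hy : 0 ≤ y) (hx : 0 ≤ x) :
    (board.getD y.toNat []).getD x.toNat "" = pvIdxA board y x := by
  unfold pvIdxA
  rw [PySem.List.pyGet?_of_nonneg _ hy, PySem.List.pyGet?_of_nonneg _ hx]
  simp [List.getD_eq_getElem?_getD]

theorem inb_bridge (board : List (List String)) (y_start x_start d_y d_x j : Int) :
    pvLineInb board y_start x_start d_y d_x j = true ↔
      (0 ≤ y_start + j * d_y ∧ y_start + j * d_y < (board.length : Int) ∧
       0 ≤ x_start + j * d_x ∧ x_start + j * d_x < ((board.headD []).length : Int)) := by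
  simp [pvLineInb, and_assoc]

-- D_ holds exactly when some position of the scan triggers A's length-0 counter artefact
theorem D_iff_trig (board : List (List String)) (col : String) (y_start x_start length d_y d_x : Int) :
    D_detect_row2 board col y_start x_start length d_y d_x ↔
      (length = 0 ∧ ∃ k : Nat, k < board.length ∧ pvTrig board col y_start x_start 0 d_y d_x k) := by
  unfold D_detect_row2
  constructor
  · rintro ⟨hL, i, hi, hb, hc, hnext⟩
    rw [List.mem_range] at hi
    refine ⟨hL, i, hi, (trig_zero_iff board col y_start x_start d_y d_x i).2 ⟨?_, ?_, ?_⟩⟩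
    · exact (inb_bridge board y_start x_start d_y d_x (i : Int)).2 hb
    · rw [cell_bridge board _ _ hb.1 hb.2.2.1] at hc
      exact fun h => hc (by rw [← cellA_line] at h; exact h)
    · intro h1 h2
      have hb1 := (inb_bridge board y_start x_start d_y d_x ((i : Int) + 1)).1 h1
      have := hnext hb1
      rw [cell_bridge board _ _ hb1.1 hb1.2.2.1] at this
      exact this (by rw [← cellA_line] at h2; exact h2)
  · rintro ⟨hL, k, hk, ht⟩
    obtain ⟨hin, hc, hnext⟩ := (trig_zero_iff board col y_start x_start d_y d_x k).1 ht
    have hb := (inb_bridge board y_start x_start d_y d_x (k : Int)).1 hin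
    refine ⟨hL, k, List.mem_range.2 hk, hb, ?_, ?_⟩
    · rw [cell_bridge board _ _ hb.1 hb.2.2.1, cellA_line]
      exact hc
    · intro hb1
      have h1 := (inb_bridge board y_start x_start d_y d_x ((k : Int) + 1)).2 hb1
      rw [cell_bridge board _ _ hb1.1 hb1.2.2.1, cellA_line]
      exact hnext h1

-- ===== VERDICT (by name: the statement is the Claim_ definition above) =====
theorem detect_row2_spec : Claim_unchanged_detect_row2 := by
  intro board col y_start x_start length d_y d_x hdom hpre hnd
  show detect_row2 board col y_start x_start length d_y d_x
      = detect_row2_alt board col y_start x_start length d_y d_x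
  by_cases hL1 : 1 ≤ length
  · by_cases hLn : length ≤ (board.length : Int)
    · rw [detect_row2_eq_fold,
        detect_row2_alt_eq_fold board col y_start x_start length d_y d_x hL1 hLn,
        B_loop board col y_start x_start length d_y d_x hL1]
      simp only [A_loop]
    · rw [detect_row2_alt_eq_zero board col y_start x_start length d_y d_x (Or.inr (by omega)),
        detect_row2_eq_fold]
      simp only [A_loop]
      rw [pvSA_of_no_trig board col y_start x_start length d_y d_x board.length]
      intro k hk ⟨_, hcnt, _⟩
      have h1 := cnt_le board col y_start x_start d_y d_x (k+1)
      have h2 : (k : Int) + 1 ≤ (board.length : Int) := by exact_mod_cast Nat.succ_le_of_lt hk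
      push_cast at h1
      omega
  · rw [detect_row2_alt_eq_zero board col y_start x_start length d_y d_x (Or.inl (by omega)),
      detect_row2_eq_fold]
    simp only [A_loop]
    rw [pvSA_of_no_trig board col y_start x_start length d_y d_x board.length]
    intro k hk ht
    by_cases hL0 : length = 0
    · subst hL0
      exact hnd ((D_iff_trig board col y_start x_start 0 d_y d_x).2 ⟨rfl, k, hk, ht⟩)
    · obtain ⟨_, hcnt, _⟩ := ht
      have := cnt_nonneg board col y_start x_start d_y d_x (k+1)
      omega

theorem detect_row2_changed : Claim_changed_detect_row2 := by
  unfold Claim_changed_detect_row2; decide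

theorem detect_row2_tight : Claim_exact_detect_row2 := by
  intro board col y_start x_start length d_y d_x hdom hpre hd
  obtain ⟨hL0, k, hk, ht⟩ := (D_iff_trig board col y_start x_start length d_y d_x).1 hd
  subst hL0
  rw [detect_row2_alt_eq_zero board col y_start x_start 0 d_y d_x (Or.inl (by omega)),
    detect_row2_eq_fold]
  simp only [A_loop]
  intro heq
  have hpos := pvSA_pos board col y_start x_start 0 d_y d_x k board.length hk ht
  have h1 : (pvSA board col y_start x_start 0 d_y d_x board.length).1 = 0 := congrArg Prod.fst heq
  have h2 : (pvSA board col y_start x_start 0 d_y d_x board.length).2.1 = 0 :=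
    congrArg (fun p => p.2.1) heq
  have h3 : (pvSA board col y_start x_start 0 d_y d_x board.length).2.2 = 0 :=
    congrArg (fun p => p.2.2) heq
  omega
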